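-- pv_equiv track=rewrite | github.com/Jarino/genetic-programming | tree/edges_parser.py | parse
-- ===== SOURCE A (Python) =====
-- def parse(edges):
--     """
--     Parse the list of edges (list of tuples) into the hash map and set of
--     nodes
--     """
--     nodes = set([y for x in edges for y in x])
--     hash_map = {}
--
--     for node in nodes:
--         hash_map[node] = []
--
--     for parent, child in edges:
--         if len(hash_map[parent]) == 0:
--             hash_map[parent] = [child]
--         else:
--             hash_map[parent].append(child)
--
--     return nodes, hash_map
-- ===== SOURCE B (Python) =====
-- def parse(edges):
--     """Group-by: adjacency via a per-node filter comprehension, no dict mutation."""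
--     nodes = list(dict.fromkeys(y for x in edges for y in x))
--     hash_map = {node: [c for p, c in edges if p == node] for node in nodes}
--     return set(nodes), hash_map
-- ===== Notes on version B (the rewrite author's own statement) =====
-- stated objective: alternative
-- what changed: B builds the adjacency map declaratively as a per-node group-by comprehension (for each node, filter the edge list for its children), replacing A's imperative scheme of an empty-list initialisation loop plus a branching in-place append loop over a mutable dict.
import Mathlib
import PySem

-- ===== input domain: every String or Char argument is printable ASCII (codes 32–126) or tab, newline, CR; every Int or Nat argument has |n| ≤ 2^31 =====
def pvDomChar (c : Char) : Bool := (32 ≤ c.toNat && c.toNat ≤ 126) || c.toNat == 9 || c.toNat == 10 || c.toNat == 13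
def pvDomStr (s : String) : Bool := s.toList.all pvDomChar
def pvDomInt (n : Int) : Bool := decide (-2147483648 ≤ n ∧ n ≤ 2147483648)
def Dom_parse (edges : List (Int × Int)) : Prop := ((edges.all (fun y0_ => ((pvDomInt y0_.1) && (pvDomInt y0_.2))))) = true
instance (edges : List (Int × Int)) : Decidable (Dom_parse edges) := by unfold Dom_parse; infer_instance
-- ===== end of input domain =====

-- B replaces A's imperative scheme (node set, empty-list init loop, branching append loop over a
-- mutable dict) by a declarative group-by: for each node, filter the edge list for its children.
-- Same result; objective: alternative (B is not faster). Python's set/dict outputs are compared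
-- order-insensitively; both ports realise the same first-occurrence order.

-- ===== PORT A =====
def parse (edges : List (Int × Int)) : List Int × (List (Int × List Int)) :=
  let nodes : List Int := PySem.Set.ofList (edges.flatMap (fun x => [x.1, x.2]))
  let hm0 : PySem.Dict Int (List Int) :=
    nodes.foldl (fun d node => d.insert node []) PySem.Dict.empty
  let hm : PySem.Dict Int (List Int) :=
    edges.foldl (fun d p =>
      if (d.getD p.1 []).length == 0 then d.insert p.1 [p.2]
      else d.modify p.1 [] (fun l => l ++ [p.2])) hm0
  (nodes, hm.items)

-- ===== PORT B =====
def parse_alt (edges : List (Int × Int)) : List Int × (List (Int × List Int)) :=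
  let nodes : List Int := PySem.List.dedup (edges.flatMap (fun x => [x.1, x.2]))
  let hm : List (Int × List Int) :=
    nodes.map (fun node => (node, (edges.filter (fun p => p.1 == node)).map (·.2)))
  (PySem.Set.ofList nodes, hm)

-- ===== PRECONDITION & SPEC =====
def Spec_parse (edges : List (Int × Int)) (out : List Int × (List (Int × List Int))) : Prop := out = parse_alt edges
instance (edges : List (Int × Int)) (out : List Int × (List (Int × List Int))) : Decidable (Spec_parse edges out) := by unfold Spec_parse; infer_instance

-- ===== CLAIM (what is proved, stated in full; the proofs are below) =====
def Claim_equal_parse : Prop := ∀ (edges : List (Int × Int)), Dom_parse edges → Spec_parse edges (parse edges)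

-- ===== LEMMAS AND PROOFS =====

-- A's branching append step is exactly a modify (both branches insert getD ++ [child])
theorem stepA_eq (d : PySem.Dict Int (List Int)) (p : Int × Int) :
    (if (d.getD p.1 []).length == 0 then d.insert p.1 [p.2]
     else d.modify p.1 [] (fun l => l ++ [p.2]))
      = d.modify p.1 [] (fun l => l ++ [p.2]) := by
  rcases h : d.getD p.1 [] with _ | ⟨x, xs⟩ <;>
    simp [PySem.Dict.modify, h]

-- updating a set with elements it already has leaves it unchanged
theorem set_update_of_subset (l s : List Int) (h : ∀ x ∈ l, x ∈ s) :
    PySem.Set.update s l = s := by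
  induction l generalizing s with
  | nil => rfl
  | cons x xs ih =>
      rw [PySem.Set.update_cons, PySem.Set.add_of_mem (h x (by simp))]
      exact ih s (fun y hy => h y (by simp [hy]))

-- the init loop gives every key the empty list (and getD defaults to it elsewhere)
theorem getD_init (l : List Int) (d : PySem.Dict Int (List Int)) (c : Int)
    (hd : d.getD c [] = []) :
    (l.foldl (fun d node => d.insert node []) d).getD c [] = [] := by
  induction l generalizing d with
  | nil => exact hd
  | cons x xs ih =>
      refine ih _ ?_
      rw [PySem.Dict.getD_insert]
      split <;> simp [hd]

-- ===== VERDICT (by name: the statement is the Claim_ definition above) =====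
theorem parse_spec : Claim_equal_parse := by
  intro edges _
  show parse edges = parse_alt edges
  unfold parse parse_alt
  simp only [PySem.List.dedup_eq_ofList, PySem.Set.ofList_ofList, stepA_eq]
  refine Prod.ext rfl ?_
  have hnodup : (PySem.Set.ofList (edges.flatMap (fun x => [x.1, x.2]))).Nodup :=
    PySem.Set.nodup_ofList _
  -- keys of the init dict are exactly the node list
  have hkeys0 :
      ((PySem.Set.ofList (edges.flatMap (fun x => [x.1, x.2]))).foldl
        (fun d node => d.insert node ([] : List Int))
        (PySem.Dict.empty : PySem.Dict Int (List Int))).keys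
        = PySem.Set.ofList (edges.flatMap (fun x => [x.1, x.2])) := by
    rw [PySem.Dict.keys_foldl_insert _ (fun _ _ => []) _]
    simp [PySem.Set.update_nil_left, PySem.Set.ofList_eq_self_of_nodup _ hnodup]
  -- the append loop does not change the key list
  have hkeys :
      (edges.foldl (fun d p => d.modify p.1 [] (fun l => l ++ [p.2]))
        ((PySem.Set.ofList (edges.flatMap (fun x => [x.1, x.2]))).foldl
          (fun d node => d.insert node ([] : List Int))
          (PySem.Dict.empty : PySem.Dict Int (List Int)))).keys
        = PySem.Set.ofList (edges.flatMap (fun x => [x.1, x.2])) := by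
    rw [PySem.Dict.keys_foldl_modify_key edges Prod.fst [] (fun _ p => (fun l => l ++ [p.2])) _,
      hkeys0]
    exact set_update_of_subset _ _ (fun x hx => by
      rw [PySem.Set.mem_ofList]
      rcases List.mem_map.mp hx with ⟨p, hp, rfl⟩
      exact List.mem_flatMap.mpr ⟨p, hp, by simp⟩)
  rw [PySem.Dict.items_eq_map_keys _ (hkeys.symm ▸ hnodup) [], hkeys]
  refine List.map_congr_left (fun c _ => ?_)
  rw [PySem.Dict.getD_foldl_modify_append, getD_init _ _ _ (by simp [PySem.Dict.getD_empty])]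
  simp
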